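-- pv_equiv track=rewrite | github.com/dezz1er/yandex_algo_training_s5 | homework1/J.py | check_jump
-- ===== SOURCE A (Python) =====
-- def check_jump(cells):
--     flag = False
--     count = 0
--     last_cell = 0
--     for cell in cells:
--         if cell != last_cell and cell != 0:
--             last_cell = cell
--             count += 1
--             flag = True
--         elif cell == 0 and flag == True:
--             last_cell = cell
--             flag = False
--     return count
-- ===== SOURCE B (Python) =====
-- def check_jump(cells):
--     # stage 1: run-length compression — collapse each maximal run of equal
--     # consecutive values to a single representative
--     runs = []
--     for c in cells:
--         if not runs or runs[-1] != c:
--             runs.append(c)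
--     # stage 2: count the nonzero runs
--     return sum(1 for c in runs if c != 0)
-- ===== Notes on version B (the rewrite author's own statement) =====
-- stated objective: alternative
-- what changed: Replaces A's single stateful flag/last_cell loop with a two-stage run-length decomposition: first compress consecutive duplicates into a runs list, then count the nonzero runs; correct because A increments exactly once per maximal nonzero run, zeros separating runs.
import Mathlib
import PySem

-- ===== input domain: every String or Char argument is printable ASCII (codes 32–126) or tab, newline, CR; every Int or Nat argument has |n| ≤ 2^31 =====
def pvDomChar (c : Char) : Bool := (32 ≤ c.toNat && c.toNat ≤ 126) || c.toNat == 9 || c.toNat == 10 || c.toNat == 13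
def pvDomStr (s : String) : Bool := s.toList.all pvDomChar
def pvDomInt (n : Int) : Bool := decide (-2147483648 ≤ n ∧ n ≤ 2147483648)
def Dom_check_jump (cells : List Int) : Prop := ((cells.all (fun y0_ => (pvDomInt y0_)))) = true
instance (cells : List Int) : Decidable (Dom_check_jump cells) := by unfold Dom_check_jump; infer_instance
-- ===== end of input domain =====

-- B (alternative): two-stage run-length decomposition — first compress consecutive
-- duplicates into a runs list, then count the nonzero runs — instead of A's
-- single stateful flag/last_cell loop.

-- ===== PORT A =====
def check_jump (cells : List Int) : Int :=
  (cells.foldl (fun (st : Bool × Int × Int) cell =>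
      if cell ≠ st.2.2 ∧ cell ≠ 0 then (true, st.2.1 + 1, cell)
      else if cell = 0 ∧ st.1 = true then (false, st.2.1, cell)
      else st)
    (false, 0, 0)).2.1

-- ===== PORT B =====
-- runs[-1] is guarded in Source B by 'not runs or …', so it is exactly getLast? here
def check_jump_alt (cells : List Int) : Int :=
  let runs := cells.foldl
    (fun (rs : List Int) c => if rs = [] ∨ rs.getLast? ≠ some c then rs ++ [c] else rs) []
  runs.foldl (fun acc c => if c ≠ 0 then acc + 1 else acc) 0

-- ===== PRECONDITION & SPEC =====
def Spec_check_jump (cells : List Int) (out : Int) : Prop := out = check_jump_alt cells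
instance (cells : List Int) (out : Int) : Decidable (Spec_check_jump cells out) := by unfold Spec_check_jump; infer_instance

-- ===== CLAIM (what is proved, stated in full; the proofs are below) =====
def Claim_equal_check_jump : Prop := ∀ (cells : List Int), Dom_check_jump cells → Spec_check_jump cells (check_jump cells)

-- ===== LEMMAS AND PROOFS =====

-- A's loop equals a pairwise count over (previous, current) pairs
lemma check_jump_loop (cells : List Int) : ∀ (count last : Int),
    (cells.foldl (fun (st : Bool × Int × Int) cell =>
        if cell ≠ st.2.2 ∧ cell ≠ 0 then (true, st.2.1 + 1, cell)
        else if cell = 0 ∧ st.1 = true then (false, st.2.1, cell)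
        else st)
      (decide (last ≠ 0), count, last)).2.1 =
    ((last :: cells).zip cells).foldl
      (fun acc p => if p.2 ≠ 0 ∧ p.2 ≠ p.1 then acc + 1 else acc) count := by
  induction cells with
  | nil => intro count last; simp
  | cons c rest ih =>
    intro count last
    by_cases h1 : c ≠ last ∧ c ≠ 0
    · simp only [List.zip_cons_cons, List.foldl_cons, if_pos h1]
      have e : ((true : Bool), count + 1, c) = (decide (c ≠ 0), count + 1, c) := by
        simp [h1.2]
      rw [e, ih]
      simp [h1.1, h1.2, And.comm]
    · by_cases h2 : c = 0 ∧ decide (last ≠ 0) = true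
      · have hc0 : c = 0 := h2.1
        simp only [List.zip_cons_cons, List.foldl_cons]
        rw [if_neg h1, if_pos h2]
        have e : ((false : Bool), count, c) = (decide (c ≠ 0), count, c) := by
          simp [hc0]
        rw [e, ih]
        simp [hc0]
      · have hcl : c = last := by
          by_cases hl : c = last
          · exact hl
          · exfalso
            by_cases hc0 : c = 0
            · have hl0 : ¬ last ≠ 0 := by
                intro hne; exact h2 ⟨hc0, by simp [hne]⟩
              push Not at hl0; exact hl (hc0.trans hl0.symm)
            · exact h1 ⟨hl, hc0⟩
        subst hcl
        simp only [List.zip_cons_cons, List.foldl_cons]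
        rw [if_neg h1, if_neg h2, ih]
        simp

-- B's two stages equal the same pairwise count, for a nonempty runs prefix
lemma check_jump_alt_loop (cells : List Int) : ∀ (rs : List Int) (p : Int),
    rs.getLast? = some p →
    ((cells.foldl
        (fun (rs : List Int) c => if rs = [] ∨ rs.getLast? ≠ some c then rs ++ [c] else rs)
        rs).foldl (fun acc c => if c ≠ 0 then acc + 1 else acc) (0 : Int)) =
    ((p :: cells).zip cells).foldl
      (fun acc q => if q.2 ≠ 0 ∧ q.2 ≠ q.1 then acc + 1 else acc)
      (rs.foldl (fun acc c => if c ≠ 0 then acc + 1 else acc) (0 : Int)) := by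
  induction cells with
  | nil => intro rs p hp; simp
  | cons c rest ih =>
    intro rs p hp
    have hne : rs ≠ [] := by intro h; simp [h] at hp
    by_cases hcp : c = p
    · subst hcp
      simp only [List.foldl_cons, List.zip_cons_cons]
      rw [if_neg (by simp [hne, hp]), ih rs c hp]
      simp
    · simp only [List.foldl_cons, List.zip_cons_cons]
      have hcond : rs.getLast? ≠ some c := by
        rw [hp]; intro h; exact hcp (Option.some.injEq .. ▸ h : p = c).symm
      rw [if_pos (Or.inr hcond), ih (rs ++ [c]) c (by simp)]
      have hfold : (rs ++ [c]).foldl (fun acc c => if c ≠ 0 then acc + 1 else acc) (0 : Int) =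
          (if c ≠ 0 then (rs.foldl (fun acc c => if c ≠ 0 then acc + 1 else acc) (0 : Int)) + 1
           else rs.foldl (fun acc c => if c ≠ 0 then acc + 1 else acc) (0 : Int)) := by
        simp [List.foldl_append]
      rw [hfold]
      by_cases hc0 : c = 0
      · simp [hc0]
      · simp [hc0, Ne.symm, hcp]

-- ===== VERDICT (by name: the statement is the Claim_ definition above) =====
theorem check_jump_spec : Claim_equal_check_jump := by
  intro cells _
  unfold Spec_check_jump check_jump check_jump_alt
  rw [show ((false, (0:Int), (0:Int)) : Bool × Int × Int)
        = (decide ((0:Int) ≠ 0), (0:Int), (0:Int)) by simp,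
      check_jump_loop cells 0 0]
  cases cells with
  | nil => simp
  | cons c rest =>
    simp only [List.zip_cons_cons, List.foldl_cons]
    have hif : (if True ∨ ([] : List Int).getLast? ≠ some c
        then ([] : List Int) ++ [c] else []) = [c] := by simp
    rw [hif]
    rw [check_jump_alt_loop rest [c] c (by simp)]
    by_cases hc : c = (0:Int) <;> simp [hc]
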